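-- pv_equiv track=rewrite | github.com/bryanpic/propstream-csv-builder | app.py | _score_properties_columns
-- ===== SOURCE A (Python) =====
-- def _score_properties_columns(cols: list[str]) -> int:
--     cols_l = [c.lower() for c in cols]
--     score = 0
--     strong_any = [
--         "apn", "mls status", "mls amount", "est. value", "est. equity",
--         "building sqft", "total bathrooms", "bedrooms", "owner occupied",
--     ]
--     score += sum(6 for s in strong_any if s in cols_l)
--     weak_any = ["address", "city", "state", "zip", "mailing address"]
--     score += sum(2 for s in weak_any if s in cols_l)
--     return score
-- ===== SOURCE B (Python) =====
-- def _score_properties_columns(cols: list[str]) -> int: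
--     weights = {
--         "apn": 6, "mls status": 6, "mls amount": 6, "est. value": 6,
--         "est. equity": 6, "building sqft": 6, "total bathrooms": 6,
--         "bedrooms": 6, "owner occupied": 6,
--         "address": 2, "city": 2, "state": 2, "zip": 2, "mailing address": 2,
--     }
--     total = 0
--     for c in {c.lower() for c in cols}:
--         total += weights.get(c, 0)
--     return total
-- ===== Notes on version B (the rewrite author's own statement) =====
-- stated objective: idiomatic
-- what changed: Replaces the two membership scans of the patterns against the lowered column list with a single pattern->weight dict and one pass over the deduplicated set of lowered columns, summing looked-up weights.
import Mathlib
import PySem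

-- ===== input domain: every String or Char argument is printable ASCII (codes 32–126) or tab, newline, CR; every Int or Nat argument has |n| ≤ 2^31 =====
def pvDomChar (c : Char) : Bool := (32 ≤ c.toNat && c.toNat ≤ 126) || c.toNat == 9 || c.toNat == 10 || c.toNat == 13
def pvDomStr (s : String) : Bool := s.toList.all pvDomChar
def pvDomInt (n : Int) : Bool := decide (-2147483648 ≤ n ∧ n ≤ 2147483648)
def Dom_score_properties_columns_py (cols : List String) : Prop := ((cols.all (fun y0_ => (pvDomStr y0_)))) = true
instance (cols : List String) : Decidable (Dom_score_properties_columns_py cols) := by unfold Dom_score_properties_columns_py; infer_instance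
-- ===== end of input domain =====

-- B replaces A's two pattern-membership scans by one weight dict and a single pass over
-- the set of lowered column names (idiomatic; same results, duplicates counted once).

-- ===== PORT A =====
def score_properties_columns_py (cols : List String) : Int :=
  let cols_l := cols.map PySem.Str.lower
  let score : Int := 0
  let strong_any : List String :=
    ["apn", "mls status", "mls amount", "est. value", "est. equity",
     "building sqft", "total bathrooms", "bedrooms", "owner occupied"]
  let score := score + strong_any.foldl (fun acc s => acc + if s ∈ cols_l then (6 : Int) else 0) 0
  let weak_any : List String := ["address", "city", "state", "zip", "mailing address"]
  let score := score + weak_any.foldl (fun acc s => acc + if s ∈ cols_l then (2 : Int) else 0) 0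
  score

-- ===== PORT B =====
def pvWeights : PySem.Dict String Int :=
  PySem.Dict.ofList
    [("apn", 6), ("mls status", 6), ("mls amount", 6), ("est. value", 6),
     ("est. equity", 6), ("building sqft", 6), ("total bathrooms", 6),
     ("bedrooms", 6), ("owner occupied", 6),
     ("address", 2), ("city", 2), ("state", 2), ("zip", 2), ("mailing address", 2)]

def score_properties_columns_py_alt (cols : List String) : Int :=
  let weights := pvWeights
  let colset : PySem.Set String := PySem.Set.ofList (cols.map PySem.Str.lower)
  colset.foldl (fun total c => total + weights.getD c 0) 0

-- ===== PRECONDITION & SPEC =====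
def Spec_score_properties_columns_py (cols : List String) (out : Int) : Prop := out = score_properties_columns_py_alt cols
instance (cols : List String) (out : Int) : Decidable (Spec_score_properties_columns_py cols out) := by unfold Spec_score_properties_columns_py; infer_instance

-- ===== CLAIM (what is proved, stated in full; the proofs are below) =====
def Claim_equal_score_properties_columns_py : Prop := ∀ (cols : List String), Dom_score_properties_columns_py cols → Spec_score_properties_columns_py cols (score_properties_columns_py cols)

-- ===== LEMMAS AND PROOFS =====

-- Peel one key off a dict under a duplicate-free summation list: the key contributes
-- its value once iff it occurs in L, provided the remaining dict gives it 0.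
lemma sum_map_getD_insert (d : PySem.Dict String Int) (p : String) (v : Int)
    (L : List String) (hL : L.Nodup) (hp : d.getD p 0 = 0) :
    (L.map (fun c => (d.insert p v).getD c 0)).sum
      = (if p ∈ L then v else 0) + (L.map (fun c => d.getD c 0)).sum := by
  induction L with
  | nil => simp
  | cons x L ih =>
    simp only [List.nodup_cons] at hL
    obtain ⟨hx, hnd⟩ := hL
    simp only [List.map_cons, List.sum_cons, ih hnd, List.mem_cons]
    by_cases hxp : x = p
    · subst hxp
      rw [PySem.Dict.getD_insert_self, if_neg hx, hp]
      simp only [true_or, if_true]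
    · rw [PySem.Dict.getD_insert_of_ne d v 0 hxp]
      have hpx : ¬ p = x := fun h => hxp h.symm
      by_cases hpL : p ∈ L
      · simp only [hpL, if_true, or_true]
        ring
      · simp only [hpL, hpx, if_false, false_or]
        ring

-- The 14 patterns, with their weights, in B's dict order.
def pvPats : List (String × Int) :=
  [("apn", 6), ("mls status", 6), ("mls amount", 6), ("est. value", 6),
   ("est. equity", 6), ("building sqft", 6), ("total bathrooms", 6),
   ("bedrooms", 6), ("owner occupied", 6),
   ("address", 2), ("city", 2), ("state", 2), ("zip", 2), ("mailing address", 2)]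

-- B's sum over a duplicate-free list equals the per-pattern indicator sum.
lemma alt_sum (L : List String) (hL : L.Nodup) :
    (L.map (fun c => pvWeights.getD c 0)).sum
      = (pvPats.map (fun p => if p.1 ∈ L then p.2 else 0)).sum := by
  have hw : pvWeights =
      ((((((((((((((PySem.Dict.empty.insert "apn" (6:Int)).insert "mls status" 6).insert
        "mls amount" 6).insert "est. value" 6).insert "est. equity" 6).insert
        "building sqft" 6).insert "total bathrooms" 6).insert "bedrooms" 6).insert
        "owner occupied" 6).insert "address" 2).insert "city" 2).insert "state" 2).insert
        "zip" 2).insert "mailing address" 2) := by decide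
  rw [hw]
  rw [sum_map_getD_insert _ _ _ _ hL (by decide)]
  rw [sum_map_getD_insert _ _ _ _ hL (by decide)]
  rw [sum_map_getD_insert _ _ _ _ hL (by decide)]
  rw [sum_map_getD_insert _ _ _ _ hL (by decide)]
  rw [sum_map_getD_insert _ _ _ _ hL (by decide)]
  rw [sum_map_getD_insert _ _ _ _ hL (by decide)]
  rw [sum_map_getD_insert _ _ _ _ hL (by decide)]
  rw [sum_map_getD_insert _ _ _ _ hL (by decide)]
  rw [sum_map_getD_insert _ _ _ _ hL (by decide)]
  rw [sum_map_getD_insert _ _ _ _ hL (by decide)]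
  rw [sum_map_getD_insert _ _ _ _ hL (by decide)]
  rw [sum_map_getD_insert _ _ _ _ hL (by decide)]
  rw [sum_map_getD_insert _ _ _ _ hL (by decide)]
  rw [sum_map_getD_insert _ _ _ _ hL (by decide)]
  simp [pvPats]
  ring

-- ===== VERDICT (by name: the statement is the Claim_ definition above) =====
theorem score_properties_columns_py_spec : Claim_equal_score_properties_columns_py := by
  intro cols _
  unfold Spec_score_properties_columns_py
  simp only [score_properties_columns_py, score_properties_columns_py_alt]
  rw [PySem.List.foldl_add (PySem.Set.ofList (cols.map PySem.Str.lower))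
        (fun c => pvWeights.getD c 0) 0]
  rw [alt_sum _ (PySem.Set.nodup_ofList (cols.map PySem.Str.lower))]
  rw [PySem.List.foldl_add _ (fun s => if s ∈ cols.map PySem.Str.lower then (6:Int) else 0) 0]
  rw [PySem.List.foldl_add _ (fun s => if s ∈ cols.map PySem.Str.lower then (2:Int) else 0) 0]
  simp only [pvPats, List.map_cons, List.map_nil, List.sum_cons, List.sum_nil,
    PySem.Set.mem_ofList]
  ring
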